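-- pv_equiv track=rewrite | github.com/nareshcode/web-api-checker | scraper/api_scanner.py | get_checks_for_severity
-- ===== SOURCE A (Python) =====
-- SECURITY_CHECKS = {
--     'critical': [
--         'https_check',
--         'open_endpoints',
--         'sql_injection',
--         'command_injection',
--         'xxe',
--         'ssrf',
--         'auth_bypass'
--     ],
--     'high': [
--         'xss',
--         'nosql_injection',
--         'ldap_injection',
--         'path_traversal',
--         'jwt_attacks',
--         'mass_assignment',
--         'insecure_deserialization',
--         'business_logic'
--     ],
--     'medium': [
--         'security_headers',
--         'cors',
--         'rate_limiting',
--         'error_handling',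
--         'input_validation',
--         'sensitive_data',
--         'http_verb_tampering',
--         'parameter_pollution',
--         'timing_attacks',
--         'information_disclosure'
--     ]
-- }
--
-- def get_checks_for_severity(severity):
--     """Get list of checks to run based on severity level"""
--     if severity == 'critical':
--         return SECURITY_CHECKS['critical']
--     elif severity == 'high':
--         return SECURITY_CHECKS['critical'] + SECURITY_CHECKS['high']
--     elif severity == 'medium':
--         return SECURITY_CHECKS['critical'] + SECURITY_CHECKS['high'] + SECURITY_CHECKS['medium']
--     else:  # 'all'
--         all_checks = []
--         for level in SECURITY_CHECKS.values():
--             all_checks.extend(level)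
--         return all_checks
-- ===== SOURCE B (Python) =====
-- SECURITY_CHECKS = {
--     'critical': [
--         'https_check',
--         'open_endpoints',
--         'sql_injection',
--         'command_injection',
--         'xxe',
--         'ssrf',
--         'auth_bypass'
--     ],
--     'high': [
--         'xss',
--         'nosql_injection',
--         'ldap_injection',
--         'path_traversal',
--         'jwt_attacks',
--         'mass_assignment',
--         'insecure_deserialization',
--         'business_logic'
--     ],
--     'medium': [
--         'security_headers',
--         'cors',
--         'rate_limiting',
--         'error_handling',
--         'input_validation',
--         'sensitive_data',
--         'http_verb_tampering',
--         'parameter_pollution',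
--         'timing_attacks',
--         'information_disclosure'
--     ]
-- }
--
-- LEVELS = ['critical', 'high', 'medium']
--
-- def get_checks_for_severity(severity):
--     """Get list of checks to run based on severity level"""
--     if severity in LEVELS:
--         idx = LEVELS.index(severity)
--         result = []
--         for level in LEVELS[:idx + 1]:
--             result.extend(SECURITY_CHECKS[level])
--         return result
--     return [check for level in LEVELS for check in SECURITY_CHECKS[level]]
-- ===== Notes on version B (the rewrite author's own statement) =====
-- stated objective: simpler
-- what changed: Replaced the branch cascade (with repeated concatenation expressions and an explicit else-loop over dict values) by one prefix-accumulation loop over an ordered level list: known severities extend with the levels up to their index, anything else gets the full comprehension.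
import Mathlib
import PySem

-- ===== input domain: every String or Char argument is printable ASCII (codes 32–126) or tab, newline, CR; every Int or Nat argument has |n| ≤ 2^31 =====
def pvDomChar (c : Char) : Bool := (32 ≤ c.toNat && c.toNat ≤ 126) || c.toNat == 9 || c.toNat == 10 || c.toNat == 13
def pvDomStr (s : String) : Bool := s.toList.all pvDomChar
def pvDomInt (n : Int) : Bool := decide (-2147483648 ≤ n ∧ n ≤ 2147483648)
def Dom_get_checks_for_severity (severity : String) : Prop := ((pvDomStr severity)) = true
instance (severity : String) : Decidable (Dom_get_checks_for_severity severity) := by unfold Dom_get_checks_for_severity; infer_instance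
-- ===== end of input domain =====

-- B replaces A's branch cascade with one prefix-accumulation loop over an ordered level list (simpler decomposition; same values).

-- ===== PORT A =====
-- the module-level dict SECURITY_CHECKS, as an insertion-ordered association list
def SECURITY_CHECKS : PySem.Dict String (List String) :=
  PySem.Dict.ofList [("critical", ["https_check", "open_endpoints", "sql_injection", "command_injection", "xxe", "ssrf", "auth_bypass"]),
   ("high", ["xss", "nosql_injection", "ldap_injection", "path_traversal", "jwt_attacks", "mass_assignment", "insecure_deserialization", "business_logic"]),
   ("medium", ["security_headers", "cors", "rate_limiting", "error_handling", "input_validation", "sensitive_data", "http_verb_tampering", "parameter_pollution", "timing_attacks", "information_disclosure"])]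


def get_checks_for_severity (severity : String) : List String :=
  if severity = "critical" then
    (PySem.Dict.get? SECURITY_CHECKS "critical").getD []
  else if severity = "high" then
    (PySem.Dict.get? SECURITY_CHECKS "critical").getD [] ++ (PySem.Dict.get? SECURITY_CHECKS "high").getD []
  else if severity = "medium" then
    (PySem.Dict.get? SECURITY_CHECKS "critical").getD [] ++ (PySem.Dict.get? SECURITY_CHECKS "high").getD [] ++ (PySem.Dict.get? SECURITY_CHECKS "medium").getD []
  else
    (PySem.Dict.values SECURITY_CHECKS).foldl (fun all_checks level => all_checks ++ level) []

-- ===== PORT B =====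
def LEVELS : List String := ["critical", "high", "medium"]

def get_checks_for_severity_alt (severity : String) : List String :=
  if LEVELS.contains severity then
    match PySem.List.index? LEVELS severity with
    | some idx =>
        (PySem.List.slice LEVELS (some 0) (some ((idx : Int) + 1))).foldl
          (fun result level => result ++ (PySem.Dict.get? SECURITY_CHECKS level).getD []) []
    | none => []   -- unreachable: severity ∈ LEVELS
  else
    LEVELS.flatMap (fun level => (PySem.Dict.get? SECURITY_CHECKS level).getD [])

-- ===== PRECONDITION & SPEC =====
def Spec_get_checks_for_severity (severity : String) (out : List String) : Prop := out = get_checks_for_severity_alt severity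
instance (severity : String) (out : List String) : Decidable (Spec_get_checks_for_severity severity out) := by unfold Spec_get_checks_for_severity; infer_instance

-- ===== CLAIM (what is proved, stated in full; the proofs are below) =====
def Claim_equal_get_checks_for_severity : Prop := ∀ (severity : String), Dom_get_checks_for_severity severity → Spec_get_checks_for_severity severity (get_checks_for_severity severity)

-- ===== LEMMAS AND PROOFS =====

-- ===== VERDICT (by name: the statement is the Claim_ definition above) =====
theorem get_checks_for_severity_spec : Claim_equal_get_checks_for_severity := by
  intro severity _
  unfold Spec_get_checks_for_severity get_checks_for_severity get_checks_for_severity_alt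
  by_cases h1 : severity = "critical"
  · subst h1; decide
  · by_cases h2 : severity = "high"
    · subst h2; decide
    · by_cases h3 : severity = "medium"
      · subst h3; decide
      · have hc : LEVELS.contains severity = false := by
          simp [LEVELS, h1, h2, h3]
        simp only [h1, h2, h3, hc, if_false, Bool.false_eq_true]
        decide
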